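-- pv_equiv track=rewrite | github.com/EdmundMartin/LeetcodeProjectAmerica | easy/2511_maximum_enemy_forts_that_can_be_captured.py | captureForts
-- ===== SOURCE A (Python) =====
-- from typing import List
--
-- def captureForts(forts: List[int]) -> int:
--
--     empty_slot = False
--     captured = 0
--     for idx in range(len(forts) - 1, -1, -1):
--         if forts[idx] == -1:
--             empty_slot = True
--         elif forts[idx] == 1:
--             empty_slot = False
--         elif empty_slot and forts[idx] == 0:
--             captured += 1
--     return captured
-- ===== SOURCE B (Python) =====
-- from typing import List
--
-- def captureForts(forts: List[int]) -> int:
--     # Left-to-right scan: keep a run of zeros since the last +/-1; flush it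
--     # into captured only when a -1 is reached. The final run is never flushed.
--     captured = 0
--     run = 0
--     for v in forts:
--         if v == -1:
--             captured += run
--             run = 0
--         elif v == 1:
--             run = 0
--         elif v == 0:
--             run += 1
--     return captured
-- ===== Notes on version B (the rewrite author's own statement) =====
-- stated objective: alternative
-- what changed: Replaces A's reverse index scan with a boolean flag (range(len-1,-1,-1) plus forts[idx]) by a forward value iteration that accumulates a run of zeros and flushes it when a -1 is reached, never flushing the trailing run.
import Mathlib
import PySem

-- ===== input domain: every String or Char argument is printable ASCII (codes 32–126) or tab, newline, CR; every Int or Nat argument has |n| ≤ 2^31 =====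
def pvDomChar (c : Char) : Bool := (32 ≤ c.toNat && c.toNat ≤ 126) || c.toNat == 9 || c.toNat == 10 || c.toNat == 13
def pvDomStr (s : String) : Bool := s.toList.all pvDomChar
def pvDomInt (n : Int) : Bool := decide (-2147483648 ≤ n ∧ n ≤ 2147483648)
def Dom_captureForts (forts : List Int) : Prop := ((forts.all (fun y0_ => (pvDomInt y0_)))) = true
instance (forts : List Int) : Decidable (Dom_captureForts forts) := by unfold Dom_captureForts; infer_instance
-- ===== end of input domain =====

-- B replaces A's reverse index scan with a forward scan accumulating a run of
-- zeros flushed at each -1 (objective: alternative decomposition, same cost).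


-- ===== PORT A =====
-- one iteration of A's loop body on state (empty_slot, captured) for value v
def captureFortsStep (st : Bool × Int) (v : Int) : Bool × Int :=
  if v = -1 then (true, st.2)
  else if v = 1 then (false, st.2)
  else if st.1 ∧ v = 0 then (st.1, st.2 + 1)
  else st

def captureForts (forts : List Int) : Int :=
  -- for idx in range(len(forts)-1, -1, -1): … forts[idx] …
  -- every idx produced by the range is in bounds, so pyGetD is exact here
  ((PySem.List.pyRange ((forts.length : Int) - 1) (-1) (-1)).foldl
    (fun st idx => captureFortsStep st (PySem.List.pyGetD forts idx 0))
    (false, 0)).2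

-- ===== PORT B =====
def captureForts_alt (forts : List Int) : Int :=
  (forts.foldl
    (fun (st : Int × Int) v =>
      if v = -1 then (0, st.2 + st.1)
      else if v = 1 then (0, st.2)
      else if v = 0 then (st.1 + 1, st.2)
      else st)
    (0, 0)).2

-- ===== PRECONDITION & SPEC =====
def Spec_captureForts (forts : List Int) (out : Int) : Prop := out = captureForts_alt forts
instance (forts : List Int) (out : Int) : Decidable (Spec_captureForts forts out) := by unfold Spec_captureForts; infer_instance

-- ===== CLAIM (what is proved, stated in full; the proofs are below) =====
def Claim_equal_captureForts : Prop := ∀ (forts : List Int), Dom_captureForts forts → Spec_captureForts forts (captureForts forts)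

-- ===== LEMMAS AND PROOFS =====

-- right-fold characterisation of A's backwards scan
def hA (l : List Int) : Bool × Int := l.foldr (fun v st => captureFortsStep st v) (false, 0)

theorem pyRange_down (n : Nat) :
    PySem.List.pyRange ((n : Int) - 1) (-1) (-1) = (PySem.List.pyRange 0 (n : Int) 1).reverse := by
  have := PySem.List.pyRange_neg_one_eq_reverse ((n : Int) - 1) (-1)
  simpa using this

theorem foldr_congr_mem' {α β : Type} (l : List β) (f g : β → α → α) (init : α)
    (h : ∀ b ∈ l, ∀ a, f b a = g b a) : l.foldr f init = l.foldr g init := by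
  induction l with
  | nil => rfl
  | cons b t ih =>
    rw [List.foldr_cons, List.foldr_cons, ih (fun b hb a => h b (List.mem_cons_of_mem _ hb) a),
      h b (List.mem_cons_self) ]

theorem foldr_pyRange_pyGetD {α : Type} (f : α → Int → α) (d : Int) :
    ∀ (l : List Int) (init : α),
      (PySem.List.pyRange 0 (l.length : Int) 1).foldr
        (fun idx st => f st (PySem.List.pyGetD l idx d)) init
      = l.foldr (fun v st => f st v) init := by
  intro l
  induction l with
  | nil => intro init; simp
  | cons v t ih =>
    intro init
    have hcons : PySem.List.pyRange 0 ((v :: t).length : Int) 1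
        = 0 :: PySem.List.pyRange 1 ((v :: t).length : Int) 1 := by
      apply PySem.List.pyRange_one_cons
      simp
    rw [hcons]
    have hshift : PySem.List.pyRange 1 ((v :: t).length : Int) 1
        = (PySem.List.pyRange 0 (t.length : Int) 1).map (fun k => 1 + k) := by
      rw [PySem.List.pyRange_one, PySem.List.pyRange_one]
      simp
    rw [List.foldr_cons, hshift, List.foldr_map]
    have hget0 : PySem.List.pyGetD (v :: t) 0 d = v := by
      simp [PySem.List.pyGetD, PySem.List.pyGet?, PySem.List.pyIdx?]
    have hbody :
        (PySem.List.pyRange 0 (t.length : Int) 1).foldr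
          (fun k st => f st (PySem.List.pyGetD (v :: t) (1 + k) d)) init
        = (PySem.List.pyRange 0 (t.length : Int) 1).foldr
          (fun k st => f st (PySem.List.pyGetD t k d)) init := by
      apply foldr_congr_mem'
      intro k hk st
      have hk' : 0 ≤ k ∧ k < (t.length : Int) := by
        simpa using (PySem.List.mem_pyRange_one).1 hk
      have hg : PySem.List.pyGetD (v :: t) (1 + k) d = PySem.List.pyGetD t k d := by
        have h0 : (1 : Int) + k = k + 1 := by ring
        have e1 := PySem.List.pyGetD_eq_getElem (v :: t) (i := k + 1) d (by omega)
          (by simp; omega)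
        have e2 := PySem.List.pyGetD_eq_getElem t (i := k) d hk'.1
          (by exact_mod_cast hk'.2)
        rw [h0, e1, e2]
        have h1 : (k + 1).toNat = k.toNat + 1 := by omega
        simp [h1]
      rw [hg]
    rw [hbody, ih, hget0, List.foldr_cons]

theorem captureForts_eq_hA (l : List Int) : captureForts l = (hA l).2 := by
  unfold captureForts hA
  rw [pyRange_down, List.foldl_reverse, foldr_pyRange_pyGetD]

theorem goB_eq (l : List Int) : ∀ (run cap : Int),
    (l.foldl
      (fun (st : Int × Int) v =>
        if v = -1 then (0, st.2 + st.1)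
        else if v = 1 then (0, st.2)
        else if v = 0 then (st.1 + 1, st.2)
        else st)
      (run, cap)).2
    = cap + (if (hA l).1 then run else 0) + (hA l).2 := by
  induction l with
  | nil => intro run cap; simp [hA]
  | cons v t ih =>
    intro run cap
    have hc : hA (v :: t) = captureFortsStep (hA t) v := rfl
    rw [List.foldl_cons, hc]
    unfold captureFortsStep
    by_cases h1 : v = -1
    · simp only [h1]
      norm_num
      rw [ih]
      split_ifs <;> ring
    · by_cases h2 : v = 1
      · simp only [h2]
        norm_num
        rw [ih]
        norm_num
      · by_cases h3 : v = 0
        · simp only [h3]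
          norm_num
          rw [ih]
          by_cases hf : (hA t).1
          · simp [hf]; ring
          · simp [hf]
        · simp only [if_neg h1, if_neg h2, if_neg h3]
          rw [ih]
          have hna : ¬((hA t).1 = true ∧ v = 0) := fun h => h3 h.2
          simp [hna]

-- ===== VERDICT (by name: the statement is the Claim_ definition above) =====
theorem captureForts_spec : Claim_equal_captureForts := by
  intro forts _
  unfold Spec_captureForts captureForts_alt
  rw [captureForts_eq_hA, goB_eq]
  simp
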